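-- pv_equiv track=rewrite | github.com/981377660LMT/algorithm-study | 11_动态规划/背包问题/3_多重背包/BoundedKnapsack.py | boundedKnapsackDPCountWays
-- ===== SOURCE A (Python) =====
-- from typing import List
--
-- MOD = int(1e9 + 7)
--
-- def boundedKnapsackDPCountWays(values: List[int], counts: List[int]) -> List[int]:
--     """
--     多重背包求方案数(分组前缀和优化).
--     dp[i] 表示总价值为 i 的方案数.
--     O(n*sum(values[i]*counts[i]))
--     """
--     n = len(values)
--     allSum = 0
--     count0 = 0
--     for i in range(n):
--         count = counts[i]
--         value = values[i]
--         if value == 0: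
--             count0 += count
--             continue
--         allSum += count * value
--     dp = [0] * (allSum + 1)
--     dp[0] = count0 + 1
--
--     maxJ = 0
--     for i in range(n):
--         value = values[i]
--         if value == 0:
--             continue
--         count = counts[i]
--         maxJ += value * count
--         for j in range(value, maxJ + 1):
--             dp[j] = (dp[j] + dp[j - value]) % MOD
--         for j in range(maxJ, value * (count + 1) - 1, -1):
--             dp[j] = (dp[j] - dp[j - value * (count + 1)]) % MOD
--     return dp
-- ===== SOURCE B (Python) =====
-- from typing import List
--
-- MOD = int(1e9 + 7)
--
-- def boundedKnapsackDPCountWays(values: List[int], counts: List[int]) -> List[int]: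
--     """多重背包求方案数, 朴素逐份转移: ndp[j] = sum(dp[j-x*v] for 0<=x<=c, x*v<=j)."""
--     count0 = sum(c for v, c in zip(values, counts) if v == 0)
--     allSum = sum(v * c for v, c in zip(values, counts) if v != 0)
--     dp = [0] * (allSum + 1)
--     dp[0] = count0 + 1
--     for v, c in zip(values, counts):
--         if v == 0:
--             continue
--         dp = [dp[0]] + [
--             sum(dp[j - x * v] for x in range(c + 1) if x * v <= j) % MOD
--             for j in range(1, allSum + 1)
--         ]
--     return dp
-- ===== Notes on version B (the rewrite author's own statement) =====
-- stated objective: simpler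
-- what changed: A updates dp in place with a sliding-window prefix trick (a forward add pass dp[j]+=dp[j-v] followed by a backward subtract pass removing the out-of-window term); B instead rebuilds a fresh dp per item, computing each entry directly as the sum over the number of copies x taken (0..count), which is shorter and plainer but asymptotically slower.
-- outside the precondition, e.g. on boundedKnapsackDPCountWays([-1, 2], [1, 1]): A returns [0, 0], B raises IndexError; on boundedKnapsackDPCountWays([1, 2], [-1, 1]): A returns [1, 0], B returns [1, 0]; on boundedKnapsackDPCountWays([1, 1], [2, -1]): A raises IndexError, B returns [1, 0]
import Mathlib
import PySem

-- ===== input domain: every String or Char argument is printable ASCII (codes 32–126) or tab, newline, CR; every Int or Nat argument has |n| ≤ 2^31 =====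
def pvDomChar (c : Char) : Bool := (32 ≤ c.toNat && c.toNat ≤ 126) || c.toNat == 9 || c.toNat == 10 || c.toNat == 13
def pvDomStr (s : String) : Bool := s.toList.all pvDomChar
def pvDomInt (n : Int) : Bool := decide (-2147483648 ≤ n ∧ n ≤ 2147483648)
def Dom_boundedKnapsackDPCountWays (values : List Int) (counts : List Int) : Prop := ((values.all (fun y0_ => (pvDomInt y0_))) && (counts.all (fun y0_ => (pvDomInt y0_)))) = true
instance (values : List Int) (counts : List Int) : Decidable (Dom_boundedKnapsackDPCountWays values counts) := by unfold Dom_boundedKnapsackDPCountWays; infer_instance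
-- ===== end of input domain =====

-- B replaces A's in-place sliding-window add/subtract passes by rebuilding a fresh dp array per item
-- from an explicit sum over the number of copies taken (objective: simpler; not faster).


-- MOD = int(1e9 + 7)
def pvMOD : Int := 1000000007

-- ===== PORT A =====
-- body of the first 'for i in range(n)' loop of A: accumulates (allSum, count0)
def knapSums (values counts : List Int) (s : Int × Int) (i : Nat) : Int × Int :=
  let count := PySem.List.pyGetD counts (i : Int) 0
  let value := PySem.List.pyGetD values (i : Int) 0
  if value = 0 then (s.1, s.2 + count) else (s.1 + count * value, s.2)

-- dp[j] = (dp[j] + dp[j - value]) % MOD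
def knapFwdUpd (value : Int) (d : List Int) (j : Int) : List Int :=
  PySem.List.pySetD d j (PySem.Int.mod (PySem.List.pyGetD d j 0 + PySem.List.pyGetD d (j - value) 0) pvMOD)

-- dp[j] = (dp[j] - dp[j - value * (count + 1)]) % MOD
def knapBwdUpd (k : Int) (d : List Int) (j : Int) : List Int :=
  PySem.List.pySetD d j (PySem.Int.mod (PySem.List.pyGetD d j 0 - PySem.List.pyGetD d (j - k) 0) pvMOD)

-- body of the second 'for i in range(n)' loop of A: state (dp, maxJ)
def knapStepA (values counts : List Int) (s : List Int × Int) (i : Nat) : List Int × Int :=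
  let value := PySem.List.pyGetD values (i : Int) 0
  if value = 0 then s else
  let count := PySem.List.pyGetD counts (i : Int) 0
  let maxJ := s.2 + value * count
  let dp := (PySem.List.pyRange value (maxJ + 1) 1).foldl (knapFwdUpd value) s.1
  let dp := (PySem.List.pyRange maxJ (value * (count + 1) - 1) (-1)).foldl (knapBwdUpd (value * (count + 1))) dp
  (dp, maxJ)

def boundedKnapsackDPCountWays (values : List Int) (counts : List Int) : List Int :=
  let n := values.length
  let p := (List.range n).foldl (knapSums values counts) (0, 0)
  let allSum := p.1
  let count0 := p.2
  let dp := List.replicate (allSum + 1).toNat 0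
  let dp := PySem.List.pySetD dp 0 (count0 + 1)
  ((List.range n).foldl (knapStepA values counts) (dp, 0)).1

-- ===== PORT B =====
-- sum(dp[j - x * v] for x in range(c + 1) if x * v <= j)
def knapBSum (dp : List Int) (v c j : Int) : Int :=
  ((PySem.List.pyRange 0 (c + 1) 1).filterMap
    (fun x => if x * v ≤ j then some (PySem.List.pyGetD dp (j - x * v) 0) else none)).sum

-- dp = [dp[0]] + [sum(...) % MOD for j in range(1, allSum + 1)]
def knapStepB (allSum : Int) (dp : List Int) (vc : Int × Int) : List Int :=
  if vc.1 = 0 then dp else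
  PySem.List.pyGetD dp 0 0 ::
    (PySem.List.pyRange 1 (allSum + 1) 1).map (fun j => PySem.Int.mod (knapBSum dp vc.1 vc.2 j) pvMOD)

def boundedKnapsackDPCountWays_alt (values : List Int) (counts : List Int) : List Int :=
  let zs := values.zip counts
  let count0 := (zs.filterMap (fun p => if p.1 = 0 then some p.2 else none)).sum
  let allSum := (zs.filterMap (fun p => if p.1 ≠ 0 then some (p.1 * p.2) else none)).sum
  let dp := PySem.List.pySetD (List.replicate (allSum + 1).toNat 0) 0 (count0 + 1)
  zs.foldl (knapStepB allSum) dp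

-- ===== PRECONDITION & SPEC =====
-- Pre_ restricts to the natural bounded-knapsack domain: every value has a count
-- (len(values) <= len(counts)) and the paired values and counts are nonnegative; outside it
-- A either raises (IndexError) or returns accidental values produced by Python's
-- negative-index wraparound in the dp updates.
def Pre_boundedKnapsackDPCountWays (values : List Int) (counts : List Int) : Prop :=
  values.length ≤ counts.length ∧ ∀ p ∈ values.zip counts, 0 ≤ p.1 ∧ 0 ≤ p.2
instance (values : List Int) (counts : List Int) : Decidable (Pre_boundedKnapsackDPCountWays values counts) := by unfold Pre_boundedKnapsackDPCountWays; infer_instance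

def pvWitness_boundedKnapsackDPCountWays : List Int × List Int := ([2, 0, 3], [2, 5, 1])

def Spec_boundedKnapsackDPCountWays (values : List Int) (counts : List Int) (out : List Int) : Prop := out = boundedKnapsackDPCountWays_alt values counts
instance (values : List Int) (counts : List Int) (out : List Int) : Decidable (Spec_boundedKnapsackDPCountWays values counts out) := by unfold Spec_boundedKnapsackDPCountWays; infer_instance

-- ===== CLAIM (what is proved, stated in full; the proofs are below) =====
def Claim_equal_boundedKnapsackDPCountWays : Prop := ∀ (values : List Int) (counts : List Int), Dom_boundedKnapsackDPCountWays values counts → Pre_boundedKnapsackDPCountWays values counts → Spec_boundedKnapsackDPCountWays values counts (boundedKnapsackDPCountWays values counts)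

-- ===== LEMMAS AND PROOFS =====

theorem pvMOD_pos : (0:Int) < pvMOD := by decide

-- full (unbounded-copies) convolution sum at index j, stepping down by vn
def knapS (a : List Int) (vn : Nat) : Nat → Int
  | j => a.getD j 0 + if _h : 1 ≤ vn ∧ vn ≤ j then knapS a vn (j - vn) else 0
  termination_by j => j
  decreasing_by omega

-- what A's forward pass stores at index j (mod-reduced running prefix)
def knapU (a : List Int) (vn : Nat) : Nat → Int
  | j => if _h : 1 ≤ vn ∧ vn ≤ j then PySem.Int.mod (a.getD j 0 + knapU a vn (j - vn)) pvMOD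
         else a.getD j 0
  termination_by j => j
  decreasing_by omega

theorem knapS_of_lt {a : List Int} {vn j : Nat} (h : ¬ (1 ≤ vn ∧ vn ≤ j)) :
    knapS a vn j = a.getD j 0 := by
  rw [knapS]; simp [h]

theorem knapS_of_le {a : List Int} {vn j : Nat} (h1 : 1 ≤ vn) (h : vn ≤ j) :
    knapS a vn j = a.getD j 0 + knapS a vn (j - vn) := by
  rw [knapS]; simp [h1, h]

theorem knapU_of_lt {a : List Int} {vn j : Nat} (h : ¬ (1 ≤ vn ∧ vn ≤ j)) :
    knapU a vn j = a.getD j 0 := by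
  rw [knapU]; simp [h]

theorem knapU_of_le {a : List Int} {vn j : Nat} (h1 : 1 ≤ vn) (h : vn ≤ j) :
    knapU a vn j = PySem.Int.mod (a.getD j 0 + knapU a vn (j - vn)) pvMOD := by
  rw [knapU]; simp [h1, h]

theorem knapU_eq_mod {a : List Int} {vn : Nat} (h1 : 1 ≤ vn)
    (hr : ∀ k : Nat, 1 ≤ k → 0 ≤ a.getD k 0 ∧ a.getD k 0 < pvMOD) :
    ∀ j : Nat, 1 ≤ j → knapU a vn j = PySem.Int.mod (knapS a vn j) pvMOD := by
  intro j
  induction j using Nat.strong_induction_on with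
  | _ j ih =>
    intro hj
    by_cases h : vn ≤ j
    · rw [knapU_of_le h1 h, knapS_of_le h1 h]
      rw [PySem.Int.mod_eq_emod_of_pos pvMOD_pos, PySem.Int.mod_eq_emod_of_pos pvMOD_pos]
      by_cases h0 : 1 ≤ j - vn
      · rw [ih (j - vn) (by omega) h0, PySem.Int.mod_eq_emod_of_pos pvMOD_pos]
        rw [Int.add_emod_emod]
      · have hjv : j - vn = 0 := by omega
        rw [hjv, knapU_of_lt (by omega), knapS_of_lt (by omega)]
    · rw [knapU_of_lt (by simp [h]), knapS_of_lt (by simp [h])]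
      have := hr j hj
      exact (PySem.Int.mod_eq_emod_of_pos pvMOD_pos ▸ (Int.emod_eq_of_lt this.1 this.2)).symm

theorem knapGetD_nonneg {α : Type} (xs : List α) {i : Int} (d : α) (h : 0 ≤ i) :
    PySem.List.pyGetD xs i d = xs.getD i.toNat d := by
  conv_lhs => rw [← Int.toNat_of_nonneg h]
  rw [PySem.List.pyGetD_natCast]

-- A's forward pass: dp[j] becomes the mod-reduced unbounded prefix knapU for v ≤ j < b
theorem knapFwd_spec (a : List Int) (v : Int) (hv : 1 ≤ v) :
    ∀ b : Int, b ≤ (a.length : Int) →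
    ((PySem.List.pyRange v b 1).foldl (knapFwdUpd v) a).length = a.length ∧
    ∀ j : Nat, ((PySem.List.pyRange v b 1).foldl (knapFwdUpd v) a).getD j 0 =
      if v ≤ (j : Int) ∧ (j : Int) < b then knapU a v.toNat j else a.getD j 0 := by
  intro b
  induction hk : (b - v).toNat generalizing b with
  | zero =>
    intro _hb
    have hbv : b ≤ v := by omega
    rw [PySem.List.pyRange_one_eq_nil hbv]
    refine ⟨rfl, fun j => ?_⟩
    simp only [List.foldl_nil]
    have : ¬ (v ≤ (j : Int) ∧ (j : Int) < b) := by omega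
    simp [this]
  | succ k ih =>
    intro hb
    have hvb : v < b := by omega
    have hsplit : PySem.List.pyRange v b 1 = PySem.List.pyRange v (b - 1) 1 ++ [b - 1] := by
      have h := PySem.List.pyRange_one_succ_right (a := v) (b := b - 1) (by omega)
      have : b - 1 + 1 = b := by ring
      rwa [this] at h
    obtain ⟨ihlen, ihget⟩ := ih (b - 1) (by omega) (by omega)
    rw [hsplit, List.foldl_append, List.foldl_cons, List.foldl_nil]
    set F := (PySem.List.pyRange v (b - 1) 1).foldl (knapFwdUpd v) a with hF
    have ht0 : (0:Int) ≤ b - 1 := by omega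
    have htn : ((b - 1).toNat : Int) = b - 1 := Int.toNat_of_nonneg ht0
    have htlen : (b - 1).toNat < a.length := by omega
    have hg1 : PySem.List.pyGetD F (b - 1) 0 = a.getD (b - 1).toNat 0 := by
      rw [knapGetD_nonneg F 0 ht0, ihget,
        if_neg (show ¬ (v ≤ (((b - 1).toNat : Nat) : Int) ∧ (((b - 1).toNat : Nat) : Int) < b - 1) by omega)]
    have hg2 : PySem.List.pyGetD F (b - 1 - v) 0 = knapU a v.toNat ((b - 1).toNat - v.toNat) := by
      rw [knapGetD_nonneg F 0 (show (0:Int) ≤ b - 1 - v by omega), ihget]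
      have hj2 : (((b - 1 - v).toNat : Nat) : Int) = b - 1 - v := Int.toNat_of_nonneg (by omega)
      have heq : (b - 1 - v).toNat = (b - 1).toNat - v.toNat := by omega
      by_cases hc : v ≤ (((b - 1 - v).toNat : Nat) : Int)
      · rw [if_pos ⟨hc, by omega⟩, heq]
      · rw [if_neg (by tauto), heq, knapU_of_lt (by omega)]
    have hbody : knapFwdUpd v F (b - 1)
        = F.set (b - 1).toNat (knapU a v.toNat (b - 1).toNat) := by
      unfold knapFwdUpd
      rw [PySem.List.pySetD_of_nonneg _ _ ht0, hg1, hg2]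
      conv_rhs => rw [knapU_of_le (show 1 ≤ v.toNat by omega) (show v.toNat ≤ (b - 1).toNat by omega)]
    rw [hbody]
    constructor
    · rw [List.length_set, ihlen]
    · intro j
      by_cases hj : j = (b - 1).toNat
      · subst hj
        rw [List.getD_eq_getElem?_getD, List.getElem?_set_self (by omega), Option.getD_some]
        rw [if_pos (show v ≤ (((b - 1).toNat : Nat) : Int) ∧ (((b - 1).toNat : Nat) : Int) < b by omega)]
      · rw [List.getD_eq_getElem?_getD, List.getElem?_set_ne (by omega), ← List.getD_eq_getElem?_getD, ihget]
        by_cases hc : v ≤ (j : Int) ∧ (j : Int) < b - 1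
        · rw [if_pos hc, if_pos ⟨hc.1, by omega⟩]
        · rw [if_neg hc, if_neg (by
            intro ⟨h1, h2⟩
            exact hc ⟨h1, by omega⟩)]

-- A's backward pass: subtracts the (still unmodified) window tail F[j - k] for k ≤ j ≤ t
theorem knapBwd_spec (k : Int) (hk : 1 ≤ k) :
    ∀ (t : Int) (F : List Int), t < (F.length : Int) →
    ((PySem.List.pyRange t (k - 1) (-1)).foldl (knapBwdUpd k) F).length = F.length ∧
    ∀ j : Nat, ((PySem.List.pyRange t (k - 1) (-1)).foldl (knapBwdUpd k) F).getD j 0 =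
      if k ≤ (j : Int) ∧ (j : Int) ≤ t then
        PySem.Int.mod (F.getD j 0 - F.getD (j - k.toNat) 0) pvMOD
      else F.getD j 0 := by
  intro t
  induction hm : (t - k + 1).toNat generalizing t with
  | zero =>
    intro F _hF
    have : t ≤ k - 1 := by omega
    rw [PySem.List.pyRange_neg_one_eq_nil this]
    refine ⟨rfl, fun j => ?_⟩
    simp only [List.foldl_nil]
    rw [if_neg (by omega)]
  | succ m ih =>
    intro F hF
    have hkt : k ≤ t := by omega
    have hcons : PySem.List.pyRange t (k - 1) (-1) = t :: PySem.List.pyRange (t - 1) (k - 1) (-1) :=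
      PySem.List.pyRange_neg_one_cons (by omega)
    rw [hcons, List.foldl_cons]
    have ht0 : (0:Int) ≤ t := by omega
    have htn : ((t.toNat : Nat) : Int) = t := Int.toNat_of_nonneg ht0
    set F' := knapBwdUpd k F t with hF'
    have hbody : F' = F.set t.toNat
        (PySem.Int.mod (F.getD t.toNat 0 - F.getD (t.toNat - k.toNat) 0) pvMOD) := by
      rw [hF']
      unfold knapBwdUpd
      rw [PySem.List.pySetD_of_nonneg _ _ ht0, knapGetD_nonneg F 0 ht0,
        knapGetD_nonneg F 0 (show (0:Int) ≤ t - k by omega)]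
      have : (t - k).toNat = t.toNat - k.toNat := by omega
      rw [this]
    have hlen' : F'.length = F.length := by rw [hbody, List.length_set]
    obtain ⟨ihlen, ihget⟩ := ih (t - 1) (by omega) F' (by omega)
    refine ⟨by rw [ihlen, hlen'], fun j => ?_⟩
    rw [ihget]
    have hgetF' : ∀ n : Nat, n ≠ t.toNat → F'.getD n 0 = F.getD n 0 := by
      intro n hn
      rw [hbody, List.getD_eq_getElem?_getD, List.getElem?_set_ne (by omega),
        ← List.getD_eq_getElem?_getD]
    by_cases hc : k ≤ (j : Int) ∧ (j : Int) ≤ t - 1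
    · rw [if_pos hc, if_pos ⟨hc.1, by omega⟩, hgetF' j (by omega), hgetF' (j - k.toNat) (by omega)]
    · rw [if_neg hc]
      by_cases hj : j = t.toNat
      · subst hj
        rw [if_pos (by omega)]
        rw [hbody, List.getD_eq_getElem?_getD, List.getElem?_set_self (by omega), Option.getD_some]
      · rw [hgetF' j hj, if_neg (by
          intro ⟨h1, h2⟩
          exact hc ⟨h1, by omega⟩)]

-- Nat-indexed form of B's inner sum (x ranges over List.range m)
def knapT (a : List Int) (vn m jn : Nat) : Int :=
  ((List.range m).filterMap
    (fun x => if x * vn ≤ jn then some (a.getD (jn - x * vn) 0) else none)).sum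

-- port-level bridge: knapBSum equals knapT on nonnegative arguments
theorem knapBSum_eq (a : List Int) (v c j : Int) (hv : 1 ≤ v) (hj : 0 ≤ j) :
    knapBSum a v c j = knapT a v.toNat (c + 1).toNat j.toNat := by
  unfold knapBSum knapT
  rw [PySem.List.pyRange_one, List.filterMap_map, sub_zero]
  congr 1
  apply List.filterMap_congr
  intro x _hx
  · simp only [Function.comp_apply, zero_add]
    have hvx : ((x * v.toNat : Nat) : Int) = (x : Int) * v := by
      push_cast
      rw [Int.toNat_of_nonneg (by omega)]
    by_cases hcond : (x : Int) * v ≤ j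
    · rw [if_pos hcond, if_pos (by omega), knapGetD_nonneg a 0 (by omega)]
      have : (j - (x : Int) * v).toNat = j.toNat - x * v.toNat := by omega
      rw [this]
    · rw [if_neg hcond, if_neg (by omega)]

theorem knapT_zero_m (a : List Int) (vn jn : Nat) : knapT a vn 0 jn = 0 := by
  simp [knapT]

-- peel the x = 0 copy
theorem knapT_succ (a : List Int) (vn m jn : Nat) :
    knapT a vn (m + 1) jn
      = a.getD jn 0 + if vn ≤ jn then knapT a vn m (jn - vn) else 0 := by
  unfold knapT
  rw [List.range_succ_eq_map, List.filterMap_cons]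
  simp only [Nat.zero_mul, Nat.zero_le, if_pos, Nat.sub_zero, List.sum_cons]
  congr 1
  rw [List.filterMap_map]
  by_cases hvj : vn ≤ jn
  · rw [if_pos hvj]
    congr 1
    apply List.filterMap_congr
    intro x _hx
    simp only [Function.comp_apply, Nat.succ_eq_add_one]
    have hmul : (x + 1) * vn = x * vn + vn := by ring
    have hcond : ((x + 1) * vn ≤ jn) ↔ (x * vn ≤ jn - vn) := by omega
    have hidx : jn - (x + 1) * vn = (jn - vn) - x * vn := by omega
    by_cases h : x * vn ≤ jn - vn
    · rw [if_pos (hcond.mpr h), if_pos h, hidx]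
    · rw [if_neg (fun hh => h (hcond.mp hh)), if_neg h]
  · rw [if_neg hvj]
    rw [List.filterMap_eq_nil_iff.mpr (by
      intro x _hx
      simp only [Function.comp_apply, Nat.succ_eq_add_one]
      rw [if_neg (by nlinarith)])]
    simp

-- with the copy bound not binding (jn < vn*m), B's sum is the full sum knapS
theorem knapT_eq_S (a : List Int) (vn : Nat) (h1 : 1 ≤ vn) :
    ∀ m jn : Nat, jn < vn * m → knapT a vn m jn = knapS a vn jn := by
  intro m
  induction m with
  | zero => intro jn h; omega
  | succ m ih =>
    intro jn h
    rw [knapT_succ]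
    by_cases hvj : vn ≤ jn
    · rw [if_pos hvj, ih (jn - vn) (by
        have : vn * (m + 1) = vn * m + vn := by ring
        omega), knapS_of_le h1 hvj]
    · rw [if_neg hvj, knapS_of_lt (by omega), add_zero]

-- with the bound binding (vn*m ≤ jn), B's sum is a difference of two full sums
theorem knapT_diff (a : List Int) (vn : Nat) (h1 : 1 ≤ vn) :
    ∀ m jn : Nat, 1 ≤ m → vn * m ≤ jn →
      knapT a vn m jn = knapS a vn jn - knapS a vn (jn - vn * m) := by
  intro m
  induction m with
  | zero => intro jn h; omega
  | succ m ih =>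
    intro jn _hm h
    have hmul : vn * (m + 1) = vn * m + vn := by ring
    have hvj : vn ≤ jn := by omega
    rw [knapT_succ, if_pos hvj]
    by_cases hm0 : m = 0
    · subst hm0
      rw [knapT_zero_m, knapS_of_le h1 hvj]
      have : jn - vn * 1 = jn - vn := by omega
      rw [this]
      ring
    · rw [ih (jn - vn) (by omega) (by omega), knapS_of_le h1 hvj]
      have : jn - vn - vn * m = jn - vn * (m + 1) := by omega
      rw [this]
      ring

-- every term the sum reads lies beyond maxJ0, so the sum is zero
theorem knapT_zero_of (a : List Int) (vn m jn : Nat)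
    (h : ∀ x : Nat, x < m → x * vn ≤ jn → a.getD (jn - x * vn) 0 = 0) :
    knapT a vn m jn = 0 := by
  unfold knapT
  apply List.sum_eq_zero
  intro y hy
  rw [List.mem_filterMap] at hy
  obtain ⟨x, hx, hfx⟩ := hy
  rw [List.mem_range] at hx
  by_cases hc : x * vn ≤ jn
  · rw [if_pos hc, h x hx hc] at hfx
    exact (Option.some_inj.mp hfx).symm
  · rw [if_neg hc] at hfx
    simp at hfx

-- one nonzero item: A's two in-place passes produce exactly B's rebuilt array
theorem knapStep_eq (a : List Int) (v c maxJ0 : Int)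
    (hv : 1 ≤ v) (hc : 0 ≤ c) (h0 : 0 ≤ maxJ0)
    (hmax : maxJ0 + v * c < (a.length : Int))
    (hr : ∀ k : Nat, 1 ≤ k → 0 ≤ a.getD k 0 ∧ a.getD k 0 < pvMOD)
    (hz : ∀ k : Nat, maxJ0 < (k : Int) → a.getD k 0 = 0) :
    ((PySem.List.pyRange (maxJ0 + v * c) (v * (c + 1) - 1) (-1)).foldl (knapBwdUpd (v * (c + 1)))
      ((PySem.List.pyRange v (maxJ0 + v * c + 1) 1).foldl (knapFwdUpd v) a))
    = a.getD 0 0 :: (PySem.List.pyRange 1 (a.length : Int) 1).map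
        (fun j => PySem.Int.mod (knapBSum a v c j) pvMOD) := by
  have hvc0 : 0 ≤ v * c := mul_nonneg (by omega) hc
  have hvk : v * 1 ≤ v * (c + 1) := by
    apply mul_le_mul_of_nonneg_left (by omega) (by omega)
  have hk1 : 1 ≤ v * (c + 1) := by omega
  set vn := v.toNat with hvndef
  set cnn := (c + 1).toNat with hcnndef
  have hvn : ((vn : Nat) : Int) = v := Int.toNat_of_nonneg (by omega)
  have hcn : ((cnn : Nat) : Int) = c + 1 := Int.toNat_of_nonneg (by omega)
  have hknc : v * (c + 1) = ((vn * cnn : Nat) : Int) := by push_cast [hvn, hcn]; ring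
  have hkn : (v * (c + 1)).toNat = vn * cnn := by omega
  have hvn1 : 1 ≤ vn := by omega
  have hcnn1 : 1 ≤ cnn := by omega
  obtain ⟨hlenF, hgetF⟩ := knapFwd_spec a v hv (maxJ0 + v * c + 1) (by omega)
  set F := (PySem.List.pyRange v (maxJ0 + v * c + 1) 1).foldl (knapFwdUpd v) a with hFdef
  obtain ⟨hlenG, hgetG⟩ := knapBwd_spec (v * (c + 1)) hk1 (maxJ0 + v * c) F (by omega)
  set G := (PySem.List.pyRange (maxJ0 + v * c) (v * (c + 1) - 1) (-1)).foldl
      (knapBwdUpd (v * (c + 1))) F with hGdef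
  have hL1 : 1 ≤ a.length := by omega
  -- F entries collapse to knapU whenever the index is at most maxJ
  have hFU : ∀ n : Nat, (n : Int) ≤ maxJ0 + v * c → F.getD n 0 = knapU a vn n := by
    intro n hn
    rw [hgetF n]
    by_cases hcnd : v ≤ (n : Int)
    · rw [if_pos ⟨hcnd, by omega⟩]
    · rw [if_neg (by tauto), knapU_of_lt (by omega)]
  apply List.ext_getElem
  · rw [hlenG, hlenF]
    simp [PySem.List.length_pyRange_one]
    omega
  · intro n hn1 hn2
    rw [hlenG, hlenF] at hn1
    have hGn : G[n] = G.getD n 0 := by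
      rw [List.getD_eq_getElem?_getD, List.getElem?_eq_getElem (by omega), Option.getD_some]
    rw [hGn, hgetG n]
    match n, hn1 with
    | 0, _ =>
      rw [if_neg (by omega), hgetF 0, if_neg (by omega)]
      rfl
    | (m + 1), hn1 =>
      have hn : (m + 1 : Nat) < a.length := hn1
      rw [List.getElem_cons_succ, List.getElem_map, PySem.List.getElem_pyRange_one]
      have hj1 : (1 : Int) + (m : Int) = ((m + 1 : Nat) : Int) := by push_cast; ring
      rw [hj1, knapBSum_eq a v c _ hv (by omega), Int.toNat_natCast]
      have hcast : (((m + 1 : Nat) : Int)).toNat = m + 1 := by omega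
      -- n as Nat index
      set n := m + 1 with hndef
      have h1n : 1 ≤ n := by omega
      by_cases hbig : maxJ0 + v * c < (n : Int)
      · -- beyond maxJ: both sides are 0
        rw [if_neg (by omega), hgetF n, if_neg (by omega)]
        have haz : a.getD n 0 = 0 := hz n (by omega)
        rw [haz, knapT_zero_of a vn cnn n (by
          intro x hx hxv
          apply hz
          have hx' : x ≤ cnn - 1 := by omega
          have hprodn : x * vn ≤ (cnn - 1) * vn := Nat.mul_le_mul_right _ hx'
          have hprodi : (((cnn - 1) * vn : Nat) : Int) = c * v := by
            push_cast [hvn]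
            rw [show ((cnn - 1 : Nat) : Int) = c by omega]
          have hsub : ((n : Int)) - ((x * vn : Nat) : Int) ≤ ((n - x * vn : Nat) : Int) := by omega
          have : ((x * vn : Nat) : Int) ≤ c * v := by
            rw [← hprodi]
            exact_mod_cast hprodn
          have hvcc : v * c = c * v := by ring
          omega)]
        rw [PySem.Int.mod_eq_emod_of_pos pvMOD_pos, Int.zero_emod]
      · by_cases hc1 : v * (c + 1) ≤ (n : Int)
        · -- window applies: difference of two full sums
          rw [if_pos ⟨hc1, by omega⟩]
          have hFn : F.getD n 0 = knapU a vn n := hFU n (by omega)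
          have hnk : n - (v * (c + 1)).toNat = n - vn * cnn := by rw [hkn]
          have hknn : vn * cnn ≤ n := by omega
          have hFnk : F.getD (n - vn * cnn) 0 = knapU a vn (n - vn * cnn) :=
            hFU _ (by omega)
          rw [hFn, hnk, hFnk]
          rw [knapT_diff a vn hvn1 cnn n hcnn1 hknn]
          rw [knapU_eq_mod hvn1 hr n h1n]
          simp only [PySem.Int.mod_eq_emod_of_pos pvMOD_pos]
          by_cases hz0 : 1 ≤ n - vn * cnn
          · rw [knapU_eq_mod hvn1 hr _ hz0, PySem.Int.mod_eq_emod_of_pos pvMOD_pos]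
            exact (Int.sub_emod _ _ _).symm
          · have hz0' : n - vn * cnn = 0 := by omega
            rw [hz0', knapU_of_lt (j := 0) (by omega), knapS_of_lt (j := 0) (by omega)]
            rw [Int.sub_emod, Int.emod_emod_of_dvd _ dvd_rfl, ← Int.sub_emod]
        · -- below the window: plain full sum on both sides
          rw [if_neg (by tauto)]
          have hFn : F.getD n 0 = knapU a vn n := hFU n (by omega)
          rw [hFn, knapU_eq_mod hvn1 hr n h1n]
          rw [knapT_eq_S a vn hvn1 cnn n (by omega)]

-- the invariants survive one nonzero item (stated on A's step, whose value knapStep_eq pins)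
theorem knapStep_inv (a : List Int) (v c maxJ0 : Int)
    (hv : 1 ≤ v) (hc : 0 ≤ c) (h0 : 0 ≤ maxJ0)
    (hmax : maxJ0 + v * c < (a.length : Int))
    (hr : ∀ k : Nat, 1 ≤ k → 0 ≤ a.getD k 0 ∧ a.getD k 0 < pvMOD)
    (hz : ∀ k : Nat, maxJ0 < (k : Int) → a.getD k 0 = 0) :
    let G := ((PySem.List.pyRange (maxJ0 + v * c) (v * (c + 1) - 1) (-1)).foldl
      (knapBwdUpd (v * (c + 1))) ((PySem.List.pyRange v (maxJ0 + v * c + 1) 1).foldl (knapFwdUpd v) a))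
    G.length = a.length ∧
    (∀ k : Nat, 1 ≤ k → 0 ≤ G.getD k 0 ∧ G.getD k 0 < pvMOD) ∧
    (∀ k : Nat, maxJ0 + v * c < (k : Int) → G.getD k 0 = 0) := by
  intro G
  have hvc0 : 0 ≤ v * c := mul_nonneg (by omega) hc
  have hvk : v * 1 ≤ v * (c + 1) := mul_le_mul_of_nonneg_left (by omega) (by omega)
  have hk1 : 1 ≤ v * (c + 1) := by omega
  obtain ⟨hlenF, hgetF⟩ := knapFwd_spec a v hv (maxJ0 + v * c + 1) (by omega)
  obtain ⟨hlenG, hgetG⟩ := knapBwd_spec (v * (c + 1)) hk1 (maxJ0 + v * c)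
    ((PySem.List.pyRange v (maxJ0 + v * c + 1) 1).foldl (knapFwdUpd v) a) (by omega)
  refine ⟨by rw [hlenG, hlenF], ?_, ?_⟩
  · intro k hk
    rw [hgetG k]
    by_cases h1 : v * (c + 1) ≤ (k : Int) ∧ (k : Int) ≤ maxJ0 + v * c
    · rw [if_pos h1]
      exact ⟨PySem.Int.mod_nonneg _ pvMOD_pos, PySem.Int.mod_lt _ pvMOD_pos⟩
    · rw [if_neg h1, hgetF k]
      by_cases h2 : v ≤ (k : Int) ∧ (k : Int) < maxJ0 + v * c + 1
      · rw [if_pos h2, knapU_of_le (by omega) (by omega)]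
        exact ⟨PySem.Int.mod_nonneg _ pvMOD_pos, PySem.Int.mod_lt _ pvMOD_pos⟩
      · rw [if_neg h2]
        exact hr k hk
  · intro k hk
    rw [hgetG k, if_neg (by omega), hgetF k, if_neg (by omega)]
    exact hz k (by omega)

-- the items loop bodies with the two reads abstracted out
def knapSumsVC (s : Int × Int) (value count : Int) : Int × Int :=
  if value = 0 then (s.1, s.2 + count) else (s.1 + count * value, s.2)

def knapStepAVC (s : List Int × Int) (value count : Int) : List Int × Int :=
  if value = 0 then s else
  ((PySem.List.pyRange (s.2 + value * count) (value * (count + 1) - 1) (-1)).foldl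
      (knapBwdUpd (value * (count + 1)))
      ((PySem.List.pyRange value (s.2 + value * count + 1) 1).foldl (knapFwdUpd value) s.1),
   s.2 + value * count)

theorem knapSums_eq (values counts : List Int) (s : Int × Int) (i : Nat) :
    knapSums values counts s i
      = knapSumsVC s (PySem.List.pyGetD values (i : Int) 0) (PySem.List.pyGetD counts (i : Int) 0) := rfl

theorem knapStepA_eq (values counts : List Int) (s : List Int × Int) (i : Nat) :
    knapStepA values counts s i
      = knapStepAVC s (PySem.List.pyGetD values (i : Int) 0) (PySem.List.pyGetD counts (i : Int) 0) := by
  unfold knapStepA knapStepAVC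
  by_cases h : PySem.List.pyGetD values (i : Int) 0 = 0 <;> simp [h]

-- 'for i in range(len(values))' reading values[i], counts[i] is a fold over zip
theorem knapFoldlRangeZip {α : Type} (f : α → Int → Int → α) :
    ∀ (values counts : List Int) (init : α), values.length ≤ counts.length →
    (List.range values.length).foldl
        (fun (s : α) (i : Nat) => f s (PySem.List.pyGetD values (i : Int) 0) (PySem.List.pyGetD counts (i : Int) 0)) init
      = (values.zip counts).foldl (fun s p => f s p.1 p.2) init := by
  intro values
  induction values with
  | nil => intro counts init _; simp
  | cons v vs ih =>
    intro counts init hlen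
    match counts with
    | [] => simp at hlen
    | c :: cs =>
      rw [List.length_cons, List.range_succ_eq_map, List.foldl_cons, List.foldl_map, List.zip_cons_cons,
        List.foldl_cons]
      have hhead : f init (PySem.List.pyGetD (v :: vs) ((0 : Nat) : Int) 0)
          (PySem.List.pyGetD (c :: cs) ((0 : Nat) : Int) 0) = f init v c := by
        rw [PySem.List.pyGetD_natCast, PySem.List.pyGetD_natCast, List.getD_cons_zero, List.getD_cons_zero]
      rw [hhead]
      have hbody : (fun (s : α) (i : Nat) =>
            f s (PySem.List.pyGetD (v :: vs) ((i.succ : Nat) : Int) 0)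
              (PySem.List.pyGetD (c :: cs) ((i.succ : Nat) : Int) 0))
          = (fun (s : α) (i : Nat) => f s (PySem.List.pyGetD vs (i : Int) 0) (PySem.List.pyGetD cs (i : Int) 0)) := by
        funext s i
        rw [PySem.List.pyGetD_natCast, PySem.List.pyGetD_natCast, PySem.List.pyGetD_natCast,
          PySem.List.pyGetD_natCast, List.getD_cons_succ, List.getD_cons_succ]
      rw [hbody]
      exact ih cs (f init v c) (by simpa using hlen)

-- phase 1 of A computes B's two filterMap sums
theorem knapSumsFold : ∀ (zs : List (Int × Int)) (s : Int × Int),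
    zs.foldl (fun s p => knapSumsVC s p.1 p.2) s
      = (s.1 + (zs.filterMap (fun p => if p.1 ≠ 0 then some (p.1 * p.2) else none)).sum,
         s.2 + (zs.filterMap (fun p => if p.1 = 0 then some p.2 else none)).sum) := by
  intro zs
  induction zs with
  | nil => intro s; simp
  | cons p zs ih =>
    intro s
    rw [List.foldl_cons, ih, List.filterMap_cons, List.filterMap_cons]
    unfold knapSumsVC
    by_cases h : p.1 = 0 <;> simp [h, Prod.ext_iff, List.sum_cons] <;> ring

theorem knapSumNZ_nonneg (zs : List (Int × Int)) (h : ∀ p ∈ zs, 0 ≤ p.1 ∧ 0 ≤ p.2) :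
    0 ≤ (zs.filterMap (fun p => if p.1 ≠ 0 then some (p.1 * p.2) else none)).sum := by
  apply List.sum_nonneg
  intro x hx
  rw [List.mem_filterMap] at hx
  obtain ⟨p, hp, hfp⟩ := hx
  by_cases h0 : p.1 = 0
  · simp [h0] at hfp
  · rw [if_pos h0] at hfp
    have := h p hp
    rw [← Option.some_inj.mp hfp]
    exact mul_nonneg this.1 this.2

-- the items loop: A's stateful in-place version equals B's rebuild version
theorem knapOuter (allSum : Int) :
    ∀ (zs : List (Int × Int)) (dp : List Int) (maxJ0 : Int),
    (∀ p ∈ zs, 0 ≤ p.1 ∧ 0 ≤ p.2) →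
    ((dp.length : Int) = allSum + 1) →
    (maxJ0 + (zs.filterMap (fun p => if p.1 ≠ 0 then some (p.1 * p.2) else none)).sum = allSum) →
    (0 ≤ maxJ0) →
    (∀ k : Nat, 1 ≤ k → 0 ≤ dp.getD k 0 ∧ dp.getD k 0 < pvMOD) →
    (∀ k : Nat, maxJ0 < (k : Int) → dp.getD k 0 = 0) →
    (zs.foldl (fun s p => knapStepAVC s p.1 p.2) (dp, maxJ0)).1
      = zs.foldl (knapStepB allSum) dp := by
  intro zs
  induction zs with
  | nil => intro dp maxJ0 _ _ _ _ _ _; rfl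
  | cons p zs ih =>
    intro dp maxJ0 hvc hlen hsum h0 hr hz
    obtain ⟨hp1, hp2⟩ := hvc p List.mem_cons_self
    rw [List.foldl_cons, List.foldl_cons]
    by_cases hp0 : p.1 = 0
    · have hA : knapStepAVC (dp, maxJ0) p.1 p.2 = (dp, maxJ0) := by
        unfold knapStepAVC; rw [if_pos hp0]
      have hB : knapStepB allSum dp p = dp := by
        unfold knapStepB; rw [if_pos hp0]
      rw [hA, hB]
      refine ih dp maxJ0 (fun q hq => hvc q (List.mem_cons_of_mem _ hq)) hlen ?_ h0 hr hz
      rw [List.filterMap_cons, if_neg (by simpa using hp0)] at hsum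
      exact hsum
    · have hv1 : 1 ≤ p.1 := by omega
      have hrest : 0 ≤ (zs.filterMap (fun p => if p.1 ≠ 0 then some (p.1 * p.2) else none)).sum :=
        knapSumNZ_nonneg zs (fun q hq => hvc q (List.mem_cons_of_mem _ hq))
      rw [List.filterMap_cons, if_pos (by simpa using hp0), List.sum_cons] at hsum
      have hprodnn : 0 ≤ p.1 * p.2 := mul_nonneg (by omega) hp2
      have hmax : maxJ0 + p.1 * p.2 < (dp.length : Int) := by omega
      have hstep := knapStep_eq dp p.1 p.2 maxJ0 hv1 hp2 h0 hmax hr hz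
      have hinv := knapStep_inv dp p.1 p.2 maxJ0 hv1 hp2 h0 hmax hr hz
      obtain ⟨hlen', hr', hz'⟩ := hinv
      have hA : knapStepAVC (dp, maxJ0) p.1 p.2
          = (((PySem.List.pyRange (maxJ0 + p.1 * p.2) (p.1 * (p.2 + 1) - 1) (-1)).foldl
                (knapBwdUpd (p.1 * (p.2 + 1)))
                ((PySem.List.pyRange p.1 (maxJ0 + p.1 * p.2 + 1) 1).foldl (knapFwdUpd p.1) dp)),
             maxJ0 + p.1 * p.2) := by
        unfold knapStepAVC; rw [if_neg hp0]
      have hB : knapStepB allSum dp p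
          = dp.getD 0 0 :: (PySem.List.pyRange 1 ((dp.length : Nat) : Int) 1).map
              (fun j => PySem.Int.mod (knapBSum dp p.1 p.2 j) pvMOD) := by
        unfold knapStepB
        rw [if_neg hp0, PySem.List.pyGetD_zero, show allSum + 1 = ((dp.length : Nat) : Int) from hlen.symm]
      rw [hA, hB, ← hstep]
      exact ih _ (maxJ0 + p.1 * p.2)
        (fun q hq => hvc q (List.mem_cons_of_mem _ hq))
        (by rw [hlen']; exact hlen) (by omega) (by omega) hr' hz'

-- ===== VERDICT (by name: the statement is the Claim_ definition above) =====
theorem boundedKnapsackDPCountWays_spec : Claim_equal_boundedKnapsackDPCountWays := by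
  intro values counts _hdom hpre
  obtain ⟨hlen, hvc⟩ := hpre
  unfold Spec_boundedKnapsackDPCountWays
  unfold boundedKnapsackDPCountWays boundedKnapsackDPCountWays_alt
  simp only []
  have hsumsfun : knapSums values counts
      = fun (s : Int × Int) (i : Nat) =>
          knapSumsVC s (PySem.List.pyGetD values (i : Int) 0) (PySem.List.pyGetD counts (i : Int) 0) := by
    funext s i; exact knapSums_eq values counts s i
  have hstepfun : knapStepA values counts
      = fun (s : List Int × Int) (i : Nat) =>
          knapStepAVC s (PySem.List.pyGetD values (i : Int) 0) (PySem.List.pyGetD counts (i : Int) 0) := by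
    funext s i; exact knapStepA_eq values counts s i
  rw [hsumsfun, hstepfun, knapFoldlRangeZip knapSumsVC values counts (0, 0) hlen,
    knapFoldlRangeZip knapStepAVC values counts _ hlen, knapSumsFold]
  simp only [zero_add]
  set zs := values.zip counts with hzs
  set AS := (zs.filterMap (fun p => if p.1 ≠ 0 then some (p.1 * p.2) else none)).sum with hAS
  set C0 := (zs.filterMap (fun p => if p.1 = 0 then some p.2 else none)).sum with hC0
  set dp0 := PySem.List.pySetD (List.replicate (AS + 1).toNat 0) 0 (C0 + 1) with hdp0
  have hASnn : 0 ≤ AS := knapSumNZ_nonneg zs hvc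
  have hdp0set : dp0 = (List.replicate (AS + 1).toNat 0).set 0 (C0 + 1) := by
    rw [hdp0, PySem.List.pySetD_of_nonneg _ _ (le_refl 0)]
    rfl
  have hlen0 : (dp0.length : Int) = AS + 1 := by
    rw [hdp0set, List.length_set, List.length_replicate]
    omega
  have hget0 : ∀ k : Nat, 1 ≤ k → dp0.getD k 0 = 0 := by
    intro k hk
    rw [hdp0set, List.getD_eq_getElem?_getD, List.getElem?_set_ne (by omega), List.getElem?_replicate]
    by_cases h : k < (AS + 1).toNat <;> simp [h]
  exact knapOuter AS zs dp0 0 hvc hlen0 (by omega) (by omega)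
    (fun k hk => by rw [hget0 k hk]; exact ⟨le_refl 0, pvMOD_pos⟩)
    (fun k hk => hget0 k (by omega))
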